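-- pv_equiv track=rewrite | github.com/kobygold/MusicXML-Annotator | music_annotator.py | fix_notes_split
-- ===== SOURCE A (Python) =====
-- def fix_notes_split(input_list):
--     output = list()
--     for i in range(len(input_list)):
--         string = input_list[i]
--         if string.startswith(' ') or string.startswith('>') or (i == 0):
--             output.append(string)
--         else:
--             output[-1] = output[-1] + 'note' + string
--     return output
-- ===== SOURCE B (Python) =====
-- def fix_notes_split(input_list):
--     output = []
--     n = len(input_list)
--     i = 0
--     while i < n:
--         k = i + 1
--         while k < n and not (input_list[k].startswith(' ') or input_list[k].startswith('>')):
--             k += 1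
--         output.append('note'.join(input_list[i:k]))
--         i = k
--     return output
-- ===== Notes on version B (the rewrite author's own statement) =====
-- stated objective: faster
-- what changed: B scans the list by group boundaries with two index pointers: an inner scan finds the end of each maximal continuation run, and the whole run input_list[i:k] is joined with 'note' in one step, instead of A's element-at-a-time pass that appends or rebuilds output[-1] by string concatenation on every element.
import Mathlib
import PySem

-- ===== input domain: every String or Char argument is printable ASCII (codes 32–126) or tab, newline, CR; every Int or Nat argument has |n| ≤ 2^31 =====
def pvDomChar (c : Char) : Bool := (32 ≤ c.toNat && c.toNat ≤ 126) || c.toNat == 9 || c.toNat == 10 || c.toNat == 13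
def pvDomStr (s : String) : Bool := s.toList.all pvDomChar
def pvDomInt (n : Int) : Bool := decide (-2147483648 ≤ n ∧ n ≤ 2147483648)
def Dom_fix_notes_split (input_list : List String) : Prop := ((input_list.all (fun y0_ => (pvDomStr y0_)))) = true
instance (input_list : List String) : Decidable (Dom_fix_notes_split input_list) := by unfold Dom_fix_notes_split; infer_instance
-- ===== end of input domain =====

-- B scans by group boundaries (two index pointers, one join per maximal run) instead of A's element-at-a-time pass rebuilding output[-1] (objective: alternative).

-- ===== PORT A =====
-- loop body of A: append on the split-start condition, else concatenate onto output[-1]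
-- (the 'none' branch is Python's IndexError on output[-1]; unreachable since i == 0 appends)
def fixStepA (output : List String) (p : Int × String) : List String :=
  if PySem.Str.startswith p.2 " " || PySem.Str.startswith p.2 ">" || p.1 == 0 then
    output ++ [p.2]
  else
    match output.getLast? with
    | some last => output.dropLast ++ [last ++ "note" ++ p.2]
    | none => []

def fix_notes_split (input_list : List String) : List String :=
  (PySem.List.enumerate input_list).foldl fixStepA []

-- ===== PORT B =====
-- the split-start condition of B (tested on continuation candidates)
def isStartB (s : String) : Bool := PySem.Str.startswith s " " || PySem.Str.startswith s ">"

-- inner while loop of B: advance k past continuation fragments; returns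
-- (the continuation run input_list[i+1:k], the remaining suffix input_list[k:])
def spanContB : List String → List String × List String
  | [] => ([], [])
  | s :: t =>
    if isStartB s then ([], s :: t)
    else
      let p := spanContB t
      (s :: p.1, p.2)

lemma spanContB_snd_length_le : ∀ l : List String, (spanContB l).2.length ≤ l.length := by
  intro l
  induction l with
  | nil => simp [spanContB]
  | cons s t ih =>
    by_cases h : isStartB s = true
    · simp [spanContB, h]
    · simp [spanContB, h]; omega

-- outer while loop of B: each iteration emits 'note'.join of one maximal group
-- (the suffix input_list[i:] is the loop state corresponding to index i)
def fixRecB : List String → List String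
  | [] => []
  | x :: rest =>
    PySem.Str.join "note" (x :: (spanContB rest).1) :: fixRecB (spanContB rest).2
termination_by l => l.length
decreasing_by
  simpa using Nat.lt_succ_of_le (spanContB_snd_length_le rest)

def fix_notes_split_alt (input_list : List String) : List String :=
  fixRecB input_list

-- ===== PRECONDITION & SPEC =====
def Spec_fix_notes_split (input_list : List String) (out : List String) : Prop := out = fix_notes_split_alt input_list
instance (input_list : List String) (out : List String) : Decidable (Spec_fix_notes_split input_list out) := by unfold Spec_fix_notes_split; infer_instance

-- ===== CLAIM =====
def Claim_equal_fix_notes_split : Prop := ∀ (input_list : List String), Dom_fix_notes_split input_list → Spec_fix_notes_split input_list (fix_notes_split input_list)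

-- ===== LEMMAS AND PROOFS =====

-- A's step for a nonzero index, with the index erased
def stepA (acc : List String) (s : String) : List String :=
  if isStartB s then acc ++ [s]
  else
    match acc.getLast? with
    | some last => acc.dropLast ++ [last ++ "note" ++ s]
    | none => []

lemma fixStepA_eq_stepA (acc : List String) (k : Int) (s : String) (hk : k ≠ 0) :
    fixStepA acc (k, s) = stepA acc s := by
  simp [fixStepA, stepA, isStartB, hk]

lemma foldl_enum_eq (rest : List String) : ∀ (k : Int) (acc : List String), 1 ≤ k →
    (PySem.List.enumerate rest k).foldl fixStepA acc = rest.foldl stepA acc := by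
  induction rest with
  | nil => intro k acc _; rfl
  | cons s t ih =>
    intro k acc hk
    rw [PySem.List.enumerate_cons]
    simp only [List.foldl_cons]
    rw [fixStepA_eq_stepA acc k s (by omega)]
    exact ih (k + 1) _ (by omega)

lemma chars_join_assoc_head (sep a b : List Char) (t : List (List Char)) :
    PySem.Chars.join sep ((a ++ sep ++ b) :: t) = PySem.Chars.join sep (a :: b :: t) := by
  cases t with
  | nil => simp [PySem.Chars.join_singleton, PySem.Chars.join_cons_cons]
  | cons c t' => simp [PySem.Chars.join_cons_cons, List.append_assoc]

lemma str_join_assoc_head (a b : String) (t : List String) :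
    PySem.Str.join "note" ((a ++ "note" ++ b) :: t) = PySem.Str.join "note" (a :: b :: t) := by
  apply String.toList_injective
  simp only [PySem.Str.toList_join, List.map_cons, String.toList_append]
  exact chars_join_assoc_head _ _ _ _

lemma join_one (s : String) : PySem.Str.join "note" [s] = s := by
  apply String.toList_injective
  simp [PySem.Str.toList_join, PySem.Chars.join_singleton]

lemma foldl_cont (cont : List String) : ∀ (acc : List String) (x : String),
    (∀ s ∈ cont, isStartB s = false) →
    cont.foldl stepA (acc ++ [x]) = acc ++ [PySem.Str.join "note" (x :: cont)] := by
  induction cont with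
  | nil => intro acc x _; simp [join_one]
  | cons c t ih =>
    intro acc x hall
    have hc : isStartB c = false := hall c (by simp)
    simp only [List.foldl_cons]
    have hs : stepA (acc ++ [x]) c = acc ++ [x ++ "note" ++ c] := by
      simp [stepA, hc]
    rw [hs, ih acc (x ++ "note" ++ c) (fun s hs => hall s (by simp [hs])),
      str_join_assoc_head]

lemma spanContB_append : ∀ l : List String, (spanContB l).1 ++ (spanContB l).2 = l := by
  intro l
  induction l with
  | nil => rfl
  | cons s t ih =>
    by_cases h : isStartB s = true <;> simp [spanContB, h, ih]

lemma spanContB_fst : ∀ (l : List String), ∀ s ∈ (spanContB l).1, isStartB s = false := by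
  intro l
  induction l with
  | nil => simp [spanContB]
  | cons s t ih =>
    by_cases h : isStartB s = true
    · simp [spanContB, h]
    · intro a ha
      simp [spanContB, h] at ha
      rcases ha with rfl | ha'
      · simpa using h
      · exact ih a ha'

lemma spanContB_snd_head : ∀ (l : List String) (y : String) (t : List String),
    (spanContB l).2 = y :: t → isStartB y = true := by
  intro l
  induction l with
  | nil => intro y t h; simp [spanContB] at h
  | cons s t ih =>
    intro y u h
    by_cases hs : isStartB s = true
    · simp [spanContB, hs] at h; rw [← h.1]; exact hs
    · simp [spanContB, hs] at h; exact ih y u h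

lemma main_loop : ∀ (n : Nat) (rest : List String), rest.length ≤ n →
    ∀ (acc : List String) (x : String),
    rest.foldl stepA (acc ++ [x]) = acc ++ fixRecB (x :: rest) := by
  intro n
  induction n with
  | zero =>
    intro rest hlen acc x
    have : rest = [] := List.eq_nil_of_length_eq_zero (Nat.le_zero.1 hlen)
    subst this
    simp [fixRecB, spanContB, join_one]
  | succ m ih =>
    intro rest hlen acc x
    have hsplit := spanContB_append rest
    have hfst := spanContB_fst rest
    conv_lhs => rw [← hsplit]
    rw [List.foldl_append, foldl_cont _ _ _ hfst]
    rw [show fixRecB (x :: rest) =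
        PySem.Str.join "note" (x :: (spanContB rest).1) :: fixRecB (spanContB rest).2
      from by rw [fixRecB]]
    cases h2 : (spanContB rest).2 with
    | nil => simp [fixRecB]
    | cons y t =>
      have hy : isStartB y = true := spanContB_snd_head rest y t h2
      have hstep : stepA (acc ++ [PySem.Str.join "note" (x :: (spanContB rest).1)]) y
          = (acc ++ [PySem.Str.join "note" (x :: (spanContB rest).1)]) ++ [y] := by
        simp [stepA, hy]
      have hlt : t.length ≤ m := by
        have := spanContB_snd_length_le rest
        rw [h2] at this
        simp at this
        omega
      simp only [List.foldl_cons, hstep]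
      rw [ih t hlt _ y]
      simp

theorem fix_notes_split_eq (input_list : List String) :
    fix_notes_split input_list = fix_notes_split_alt input_list := by
  cases input_list with
  | nil => unfold fix_notes_split fix_notes_split_alt; rw [fixRecB]; rfl
  | cons x rest =>
    unfold fix_notes_split fix_notes_split_alt
    rw [PySem.List.enumerate_cons]
    simp only [List.foldl_cons]
    have h0 : fixStepA [] (0, x) = [x] := by simp [fixStepA]
    rw [h0, foldl_enum_eq rest (0 + 1) [x] (by norm_num)]
    have := main_loop rest.length rest le_rfl [] x
    simpa using this

-- ===== VERDICT =====
theorem fix_notes_split_spec : Claim_equal_fix_notes_split := by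
  intro input_list _
  exact fix_notes_split_eq input_list
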